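-- pv_equiv track=rewrite | github.com/olmoceriotti/pySteg | steganography/PVD.py | _embed_info_gen
-- ===== SOURCE A (Python) =====
-- import math
--
-- def _embed_info_gen(n):
--     squares = (0, 2, 4, 6, 8, 16, 32, 64, 128, 192, 256)
--     l , r = 0, len(squares) - 1
--     while r - l > 1:
--         mid = (l + r) // 2
--         if squares[mid] >= n:
--             r = mid
--         else:
--             l = mid
--     return int(math.log2(squares[r] - squares[l])), squares[l], squares[r]
-- ===== SOURCE B (Python) =====
-- import math
--
-- def _embed_info_gen(n):
--     squares = (0, 2, 4, 6, 8, 16, 32, 64, 128, 192, 256)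
--     r = len(squares) - 1
--     for i in range(1, len(squares)):
--         if squares[i] >= n:
--             r = i
--             break
--     l = r - 1
--     return int(math.log2(squares[r] - squares[l])), squares[l], squares[r]
-- ===== Notes on version B (the rewrite author's own statement) =====
-- stated objective: simpler
-- what changed: Replaces the binary search over the fixed quantization table with a single linear scan that breaks at the first table entry >= n (default r = last index), then takes l = r-1.
import Mathlib
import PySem

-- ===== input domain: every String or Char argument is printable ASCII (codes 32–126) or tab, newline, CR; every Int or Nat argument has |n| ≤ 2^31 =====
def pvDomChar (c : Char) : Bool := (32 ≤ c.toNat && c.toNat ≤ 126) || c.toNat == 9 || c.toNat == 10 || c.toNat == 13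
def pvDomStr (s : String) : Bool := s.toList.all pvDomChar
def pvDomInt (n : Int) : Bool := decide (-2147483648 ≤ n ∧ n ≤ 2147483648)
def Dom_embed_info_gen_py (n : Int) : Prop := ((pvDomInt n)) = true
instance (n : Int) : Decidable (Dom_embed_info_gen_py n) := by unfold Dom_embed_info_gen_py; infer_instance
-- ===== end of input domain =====

-- B replaces A's binary search over the fixed table with a single linear scan (break at first entry ≥ n); objective: simpler.

-- ===== PORT A =====
-- the fixed tuple 'squares' of the Python source
def pySquares : List Int := [0, 2, 4, 6, 8, 16, 32, 64, 128, 192, 256]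

-- the while-loop of A, step for step (termination: r - l strictly decreases)
def pyLoopA (n : Int) (l r : Nat) : Nat × Nat :=
  if _h : r - l > 1 then
    let mid := (l + r) / 2
    if pySquares.getD mid 0 ≥ n then pyLoopA n l mid else pyLoopA n mid r
  else (l, r)
termination_by r - l
decreasing_by all_goals omega

def embed_info_gen_py (n : Int) : Int × Int × Int :=
  let lr := pyLoopA n 0 (pySquares.length - 1)
  -- int(math.log2(d)): d here is always a positive power of two, so float log2 is exact = Nat.log2
  ((Nat.log2 (pySquares.getD lr.2 0 - pySquares.getD lr.1 0).toNat : Int),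
   pySquares.getD lr.1 0, pySquares.getD lr.2 0)

-- ===== PORT B =====
-- B's for-loop with break: first index i in [1, len-1] with squares[i] ≥ n, else r stays len-1
def pyScanB (n : Int) : List Nat → Nat
  | [] => 10
  | i :: rest => if pySquares.getD i 0 ≥ n then i else pyScanB n rest

def embed_info_gen_py_alt (n : Int) : Int × Int × Int :=
  let r := pyScanB n (List.range' 1 10)
  let l := r - 1
  ((Nat.log2 (pySquares.getD r 0 - pySquares.getD l 0).toNat : Int),
   pySquares.getD l 0, pySquares.getD r 0)

-- ===== PRECONDITION & SPEC =====
def Spec_embed_info_gen_py (n : Int) (out : Int × Int × Int) : Prop := out = embed_info_gen_py_alt n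
instance (n : Int) (out : Int × Int × Int) : Decidable (Spec_embed_info_gen_py n out) := by unfold Spec_embed_info_gen_py; infer_instance

-- ===== CLAIM (what is proved, stated in full; the proofs are below) =====
def Claim_equal_embed_info_gen_py : Prop := ∀ (n : Int), Dom_embed_info_gen_py n → Spec_embed_info_gen_py n (embed_info_gen_py n)

-- ===== LEMMAS AND PROOFS =====
theorem embed_eq (n : Int) : embed_info_gen_py n = embed_info_gen_py_alt n := by
  unfold embed_info_gen_py embed_info_gen_py_alt
  by_cases h2 : n ≤ (2 : Int)
  · simp [pyLoopA, pyScanB, pySquares, List.range', (show ((2:Int) ≥ n) from by omega), (show ((4:Int) ≥ n) from by omega), (show ((6:Int) ≥ n) from by omega), (show ((8:Int) ≥ n) from by omega), (show ((16:Int) ≥ n) from by omega), (show ((32:Int) ≥ n) from by omega), (show ((64:Int) ≥ n) from by omega), (show ((128:Int) ≥ n) from by omega), (show ((192:Int) ≥ n) from by omega), (show ((256:Int) ≥ n) from by omega)]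
  by_cases h4 : n ≤ (4 : Int)
  · simp [pyLoopA, pyScanB, pySquares, List.range', (show ¬((2:Int) ≥ n) from by omega), (show ((4:Int) ≥ n) from by omega), (show ((6:Int) ≥ n) from by omega), (show ((8:Int) ≥ n) from by omega), (show ((16:Int) ≥ n) from by omega), (show ((32:Int) ≥ n) from by omega), (show ((64:Int) ≥ n) from by omega), (show ((128:Int) ≥ n) from by omega), (show ((192:Int) ≥ n) from by omega), (show ((256:Int) ≥ n) from by omega)]
  by_cases h6 : n ≤ (6 : Int)
  · simp [pyLoopA, pyScanB, pySquares, List.range', (show ¬((2:Int) ≥ n) from by omega), (show ¬((4:Int) ≥ n) from by omega), (show ((6:Int) ≥ n) from by omega), (show ((8:Int) ≥ n) from by omega), (show ((16:Int) ≥ n) from by omega), (show ((32:Int) ≥ n) from by omega), (show ((64:Int) ≥ n) from by omega), (show ((128:Int) ≥ n) from by omega), (show ((192:Int) ≥ n) from by omega), (show ((256:Int) ≥ n) from by omega)]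
  by_cases h8 : n ≤ (8 : Int)
  · simp [pyLoopA, pyScanB, pySquares, List.range', (show ¬((2:Int) ≥ n) from by omega), (show ¬((4:Int) ≥ n) from by omega), (show ¬((6:Int) ≥ n) from by omega), (show ((8:Int) ≥ n) from by omega), (show ((16:Int) ≥ n) from by omega), (show ((32:Int) ≥ n) from by omega), (show ((64:Int) ≥ n) from by omega), (show ((128:Int) ≥ n) from by omega), (show ((192:Int) ≥ n) from by omega), (show ((256:Int) ≥ n) from by omega)]
  by_cases h16 : n ≤ (16 : Int)
  · simp [pyLoopA, pyScanB, pySquares, List.range', (show ¬((2:Int) ≥ n) from by omega), (show ¬((4:Int) ≥ n) from by omega), (show ¬((6:Int) ≥ n) from by omega), (show ¬((8:Int) ≥ n) from by omega), (show ((16:Int) ≥ n) from by omega), (show ((32:Int) ≥ n) from by omega), (show ((64:Int) ≥ n) from by omega), (show ((128:Int) ≥ n) from by omega), (show ((192:Int) ≥ n) from by omega), (show ((256:Int) ≥ n) from by omega)]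
  by_cases h32 : n ≤ (32 : Int)
  · simp [pyLoopA, pyScanB, pySquares, List.range', (show ¬((2:Int) ≥ n) from by omega), (show ¬((4:Int) ≥ n) from by omega), (show ¬((6:Int) ≥ n) from by omega), (show ¬((8:Int) ≥ n) from by omega), (show ¬((16:Int) ≥ n) from by omega), (show ((32:Int) ≥ n) from by omega), (show ((64:Int) ≥ n) from by omega), (show ((128:Int) ≥ n) from by omega), (show ((192:Int) ≥ n) from by omega), (show ((256:Int) ≥ n) from by omega)]
  by_cases h64 : n ≤ (64 : Int)
  · simp [pyLoopA, pyScanB, pySquares, List.range', (show ¬((2:Int) ≥ n) from by omega), (show ¬((4:Int) ≥ n) from by omega), (show ¬((6:Int) ≥ n) from by omega), (show ¬((8:Int) ≥ n) from by omega), (show ¬((16:Int) ≥ n) from by omega), (show ¬((32:Int) ≥ n) from by omega), (show ((64:Int) ≥ n) from by omega), (show ((128:Int) ≥ n) from by omega), (show ((192:Int) ≥ n) from by omega), (show ((256:Int) ≥ n) from by omega)]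
  by_cases h128 : n ≤ (128 : Int)
  · simp [pyLoopA, pyScanB, pySquares, List.range', (show ¬((2:Int) ≥ n) from by omega), (show ¬((4:Int) ≥ n) from by omega), (show ¬((6:Int) ≥ n) from by omega), (show ¬((8:Int) ≥ n) from by omega), (show ¬((16:Int) ≥ n) from by omega), (show ¬((32:Int) ≥ n) from by omega), (show ¬((64:Int) ≥ n) from by omega), (show ((128:Int) ≥ n) from by omega), (show ((192:Int) ≥ n) from by omega), (show ((256:Int) ≥ n) from by omega)]
  by_cases h192 : n ≤ (192 : Int)
  · simp [pyLoopA, pyScanB, pySquares, List.range', (show ¬((2:Int) ≥ n) from by omega), (show ¬((4:Int) ≥ n) from by omega), (show ¬((6:Int) ≥ n) from by omega), (show ¬((8:Int) ≥ n) from by omega), (show ¬((16:Int) ≥ n) from by omega), (show ¬((32:Int) ≥ n) from by omega), (show ¬((64:Int) ≥ n) from by omega), (show ¬((128:Int) ≥ n) from by omega), (show ((192:Int) ≥ n) from by omega), (show ((256:Int) ≥ n) from by omega)]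
  by_cases h256 : n ≤ (256 : Int)
  · simp [pyLoopA, pyScanB, pySquares, List.range', (show ¬((2:Int) ≥ n) from by omega), (show ¬((4:Int) ≥ n) from by omega), (show ¬((6:Int) ≥ n) from by omega), (show ¬((8:Int) ≥ n) from by omega), (show ¬((16:Int) ≥ n) from by omega), (show ¬((32:Int) ≥ n) from by omega), (show ¬((64:Int) ≥ n) from by omega), (show ¬((128:Int) ≥ n) from by omega), (show ¬((192:Int) ≥ n) from by omega), (show ((256:Int) ≥ n) from by omega)]
  · simp [pyLoopA, pyScanB, pySquares, List.range', (show ¬((2:Int) ≥ n) from by omega), (show ¬((4:Int) ≥ n) from by omega), (show ¬((6:Int) ≥ n) from by omega), (show ¬((8:Int) ≥ n) from by omega), (show ¬((16:Int) ≥ n) from by omega), (show ¬((32:Int) ≥ n) from by omega), (show ¬((64:Int) ≥ n) from by omega), (show ¬((128:Int) ≥ n) from by omega), (show ¬((192:Int) ≥ n) from by omega), (show ¬((256:Int) ≥ n) from by omega)]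

-- ===== VERDICT (by name: the statement is the Claim_ definition above) =====
theorem embed_info_gen_py_spec : Claim_equal_embed_info_gen_py := by
  intro n _; exact embed_eq n
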